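-- pv_equiv track=rewrite | github.com/vishwa-path/project | run_majority_vote_rag.py | simple_retrieve
-- ===== SOURCE A (Python) =====
-- def simple_retrieve(question, docs, top_k=5):
--     q_words = set(question.lower().split())
--
--     scored = []
--     for doc in docs:
--         text = (doc.get("title", "") + " " + doc.get("text", "")).lower()
--         score = sum(1 for w in q_words if w in text)
--         scored.append((score, doc))
--
--     scored.sort(key=lambda x: x[0], reverse=True)
--     return [doc for score, doc in scored[:top_k]]
-- ===== SOURCE B (Python) =====
-- def simple_retrieve(question, docs, top_k=5):
--     # Bucket selection: scores lie in [0, len(q_words)], so drop each doc into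
--     # buckets[score] in one pass and emit buckets from the highest score down
--     # (stable descending order without building or sorting a scored list).
--     q_words = set(question.lower().split())
--
--     buckets = [[] for _ in range(len(q_words) + 1)]
--     for doc in docs:
--         text = (doc.get("title", "") + " " + doc.get("text", "")).lower()
--         hits = len([w for w in q_words if w in text])
--         buckets[hits].append(doc)
--
--     out = []
--     for bucket in reversed(buckets):
--         out.extend(bucket)
--     return out[:top_k]
-- ===== Notes on version B (the rewrite author's own statement) =====
-- stated objective: alternative
-- what changed: Replaces A's build-a-scored-list-then-stable-reverse-sort-and-slice with bucket selection: each doc is dropped into buckets[score] (scores are bounded by len(q_words)) in a single pass and the buckets are concatenated from the highest score down, reproducing the stable descending order without any sort or intermediate scored list.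
import Mathlib
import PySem

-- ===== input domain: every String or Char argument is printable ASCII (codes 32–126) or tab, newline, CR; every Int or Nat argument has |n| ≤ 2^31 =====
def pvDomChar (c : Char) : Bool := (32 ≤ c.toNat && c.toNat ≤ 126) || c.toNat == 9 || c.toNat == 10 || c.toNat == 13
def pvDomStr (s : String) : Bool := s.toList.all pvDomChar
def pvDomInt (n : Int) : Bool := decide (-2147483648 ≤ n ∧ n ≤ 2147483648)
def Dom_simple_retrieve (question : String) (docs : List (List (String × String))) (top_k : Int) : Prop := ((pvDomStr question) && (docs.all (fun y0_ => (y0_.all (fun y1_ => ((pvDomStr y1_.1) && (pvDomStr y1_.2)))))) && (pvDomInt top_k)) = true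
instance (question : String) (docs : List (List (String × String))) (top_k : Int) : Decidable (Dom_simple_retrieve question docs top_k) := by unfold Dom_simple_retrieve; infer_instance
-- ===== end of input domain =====

-- B replaces A's build-score-list-then-stable-reverse-sort by bucket selection: each doc is
-- dropped into buckets[score] in one pass (scores lie in [0, len(q_words)]) and the buckets
-- are emitted from the highest score down; same return value, no sort.

-- ===== PORT A =====
-- A's per-doc score: sum(1 for w in q_words if w in text)
def pvScore (q_words : List String) (doc : List (String × String)) : Int :=
  let text := PySem.Str.lower (PySem.Dict.getD (PySem.Dict.mk doc) "title" "" ++ " " ++ PySem.Dict.getD (PySem.Dict.mk doc) "text" "")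
  (q_words.map (fun w => if PySem.Str.isIn w text then (1 : Int) else 0)).sum

def simple_retrieve (question : String) (docs : List (List (String × String))) (top_k : Int) : List (List (String × String)) :=
  let q_words : PySem.Set String := PySem.Set.ofList (PySem.Str.split₀ (PySem.Str.lower question))
  let scored := docs.foldl (fun acc doc => acc ++ [(pvScore q_words doc, doc)]) []
  let sortedScored := PySem.List.sorted scored (fun x => x.1) true
  (PySem.List.slice sortedScored none (some top_k)).map (fun p => p.2)

-- ===== PORT B =====
-- B's per-doc hit count: len([w for w in q_words if w in text])
def pvHits (q_words : List String) (doc : List (String × String)) : Nat :=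
  let text := PySem.Str.lower (PySem.Dict.getD (PySem.Dict.mk doc) "title" "" ++ " " ++ PySem.Dict.getD (PySem.Dict.mk doc) "text" "")
  (q_words.filter (fun w => PySem.Str.isIn w text)).length

def simple_retrieve_alt (question : String) (docs : List (List (String × String))) (top_k : Int) : List (List (String × String)) :=
  let q_words : PySem.Set String := PySem.Set.ofList (PySem.Str.split₀ (PySem.Str.lower question))
  -- buckets = [[] for _ in range(len(q_words) + 1)]
  let buckets0 : List (List (List (String × String))) :=
    (PySem.List.pyRange 0 ((q_words.length : Int) + 1) 1).map (fun _ => [])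
  -- for doc in docs: buckets[hits].append(doc)   (hits ≤ len(q_words), so always in range)
  let buckets := docs.foldl (fun B doc => B.modify (pvHits q_words doc) (fun b => b ++ [doc])) buckets0
  -- out = []; for bucket in reversed(buckets): out.extend(bucket)
  let out := buckets.reverse.foldl (fun acc b => acc ++ b) []
  PySem.List.slice out none (some top_k)

-- ===== PRECONDITION & SPEC =====
def Spec_simple_retrieve (question : String) (docs : List (List (String × String))) (top_k : Int) (out : List (List (String × String))) : Prop := out = simple_retrieve_alt question docs top_k
instance (question : String) (docs : List (List (String × String))) (top_k : Int) (out : List (List (String × String))) : Decidable (Spec_simple_retrieve question docs top_k out) := by unfold Spec_simple_retrieve; infer_instance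

-- ===== CLAIM (what is proved, stated in full; the proofs are below) =====
def Claim_equal_simple_retrieve : Prop := ∀ (question : String) (docs : List (List (String × String))) (top_k : Int), Dom_simple_retrieve question docs top_k → Spec_simple_retrieve question docs top_k (simple_retrieve question docs top_k)

-- ===== LEMMAS AND PROOFS =====

-- slice with an upper bound commutes with map
theorem pv_slice_map {α β : Type} (f : α → β) (xs : List α) (b : Int) :
    PySem.List.slice (xs.map f) none (some b) = (PySem.List.slice xs none (some b)).map f := by
  simp [PySem.List.slice, List.map_take]

-- insertBy passes over a prefix it never inserts before
theorem pv_insertBy_append {α : Type} (before : α → α → Bool) (x : α) (L₁ L₂ : List α)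
    (h : ∀ y ∈ L₁, before x y = false) :
    PySem.List.insertBy before x (L₁ ++ L₂) = L₁ ++ PySem.List.insertBy before x L₂ := by
  induction L₁ with
  | nil => simp
  | cons a t ih =>
      simp only [List.cons_append, PySem.List.insertBy, h a (by simp)]
      simp only [Bool.false_eq_true, if_false]
      rw [ih (fun y hy => h y (by simp [hy]))]

-- insertBy puts x in front when it goes before every element
theorem pv_insertBy_front {α : Type} (before : α → α → Bool) (x : α) (L : List α)
    (h : ∀ y ∈ L, before x y = true) :
    PySem.List.insertBy before x L = x :: L := by
  cases L with
  | nil => rfl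
  | cons a t => simp [PySem.List.insertBy, h a (by simp)]

-- split the countdown range at an interior value
theorem pv_range_split (m v : Int) (h0 : 0 ≤ v) (hm : v ≤ m) :
    PySem.List.pyRange m (-1) (-1)
      = PySem.List.pyRange m v (-1) ++ v :: PySem.List.pyRange (v - 1) (-1) (-1) := by
  rw [PySem.List.pyRange_neg_one_eq_reverse m (-1), PySem.List.pyRange_neg_one_eq_reverse m v,
      PySem.List.pyRange_neg_one_eq_reverse (v - 1) (-1)]
  have e0 : (-1 : Int) + 1 = 0 := by ring
  have e1 : v - 1 + 1 = v := by ring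
  rw [e0, e1]
  rw [PySem.List.pyRange_one_append 0 v (m + 1) h0 (by omega),
      PySem.List.pyRange_one_cons (show v < m + 1 by omega)]
  simp

-- stable reverse sort by a score bounded in [0, m] equals bucket concatenation from m down to 0
theorem pv_sorted_rev_eq_buckets {D : Type} (xs : List (Int × D)) (m : Int)
    (hb : ∀ p ∈ xs, 0 ≤ p.1 ∧ p.1 ≤ m) :
    PySem.List.sorted xs (fun p => p.1) true
      = (PySem.List.pyRange m (-1) (-1)).flatMap (fun s => xs.filter (fun p => p.1 == s)) := by
  induction xs using List.reverseRecOn with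
  | nil => simp [PySem.List.sorted]
  | append_singleton t x ih =>
      have hx := hb x (by simp)
      have ht : ∀ p ∈ t, 0 ≤ p.1 ∧ p.1 ≤ m := fun p hp => hb p (by simp [hp])
      rw [PySem.List.sorted_rev_eq_foldl_insertBy, List.foldl_append,
          ← PySem.List.sorted_rev_eq_foldl_insertBy, ih ht]
      simp only [List.foldl_cons, List.foldl_nil]
      rw [pv_range_split m x.1 hx.1 hx.2]
      simp only [List.flatMap_append, List.flatMap_cons]
      rw [← List.append_assoc, ← List.append_assoc]
      rw [pv_insertBy_append _ x _ _ ?hpass]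
      case hpass =>
        intro y hy
        rcases List.mem_append.mp hy with hy1 | hy2
        · obtain ⟨s, hs, hys⟩ := List.mem_flatMap.mp hy1
          have hgt : x.1 < s := (PySem.List.mem_pyRange_neg_one.mp hs).1
          have hkey : y.1 = s := by simpa using (List.mem_filter.mp hys).2
          simp only [decide_eq_false_iff_not]
          omega
        · have hkey : y.1 = x.1 := by simpa using (List.mem_filter.mp hy2).2
          simp only [decide_eq_false_iff_not]
          omega
      rw [pv_insertBy_front _ x _ ?hfront]
      case hfront =>
        intro y hy
        obtain ⟨s, hs, hys⟩ := List.mem_flatMap.mp hy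
        have hlt : s ≤ x.1 - 1 := (PySem.List.mem_pyRange_neg_one.mp hs).2
        have hkey : y.1 = s := by simpa using (List.mem_filter.mp hys).2
        simp only [decide_eq_true_eq]
        omega
      have hR1 : (PySem.List.pyRange m x.1 (-1)).flatMap
            (fun s => List.filter (fun p => p.1 == s) (t ++ [x]))
          = (PySem.List.pyRange m x.1 (-1)).flatMap (fun s => List.filter (fun p => p.1 == s) t) := by
        apply List.flatMap_congr
        intro s hs
        have hgt : x.1 < s := (PySem.List.mem_pyRange_neg_one.mp hs).1
        simp [List.filter_append, show ¬ (x.1 = s) by omega]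
      have hR2 : (PySem.List.pyRange (x.1 - 1) (-1) (-1)).flatMap
            (fun s => List.filter (fun p => p.1 == s) (t ++ [x]))
          = (PySem.List.pyRange (x.1 - 1) (-1) (-1)).flatMap (fun s => List.filter (fun p => p.1 == s) t) := by
        apply List.flatMap_congr
        intro s hs
        have hlt : s ≤ x.1 - 1 := (PySem.List.mem_pyRange_neg_one.mp hs).2
        simp [List.filter_append, show ¬ (x.1 = s) by omega]
      rw [hR1, hR2]
      simp [List.filter_append]

-- A's 0/1-sum score IS B's filter-length hit count
theorem pv_score_eq_hits (q : List String) (d : List (String × String)) :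
    pvScore q d = ((pvHits q d : Nat) : Int) := by
  unfold pvScore pvHits
  rw [PySem.List.sum_map_ite_one_zero]
  simp [List.countP_eq_length_filter]

-- the score is bounded by the number of question words
theorem pv_score_bounds (q : List String) (d : List (String × String)) :
    0 ≤ pvScore q d ∧ pvScore q d ≤ (q.length : Int) := by
  rw [pv_score_eq_hits]
  unfold pvHits
  constructor
  · exact_mod_cast Int.natCast_nonneg _
  · exact_mod_cast List.length_filter_le _ _

-- the bucket fold, pointwise: bucket i collects exactly the elements with f d = i, in order
theorem pv_foldl_modify {D : Type} (f : D → Nat) (ds : List D) (B : List (List D)) (i : Nat) :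
    (ds.foldl (fun B d => B.modify (f d) (fun b => b ++ [d])) B)[i]? =
      (B[i]?).map (fun b => b ++ ds.filter (fun d => f d == i)) := by
  induction ds generalizing B with
  | nil => cases h : B[i]? <;> simp [h]
  | cons d t ih =>
      rw [List.foldl_cons, ih, List.getElem?_modify]
      cases h : B[i]? with
      | none => simp
      | some b =>
          by_cases hd : f d = i
          · simp [hd, List.append_assoc]
          · simp [hd]

-- the bucket fold over empty buckets yields the buckets of filters
theorem pv_buckets_eq {D : Type} (f : D → Nat) (ds : List D) (n : Nat) :
    ds.foldl (fun B d => B.modify (f d) (fun b => b ++ [d])) ((List.range n).map (fun _ => []))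
      = (List.range n).map (fun i => ds.filter (fun d => f d == i)) := by
  apply List.ext_getElem?
  intro i
  rw [pv_foldl_modify]
  by_cases hi : i < n
  · simp [hi]
  · rw [List.getElem?_eq_none (by simpa using Nat.le_of_not_lt hi),
        List.getElem?_eq_none (by simpa using Nat.le_of_not_lt hi)]
    rfl

-- extending an accumulator by each block is flattening
theorem pv_foldl_append_eq_flatten {α : Type} (l : List (List α)) (a : List α) :
    l.foldl (fun acc b => acc ++ b) a = a ++ l.flatten := by
  induction l generalizing a with
  | nil => simp
  | cons x t ih => simp [ih, List.append_assoc]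

-- flatMap over the countdown range = flatten of the reversed bucket list
theorem pv_countdown_flatMap {α : Type} (g : Int → List α) (m : Nat) :
    (PySem.List.pyRange (m : Int) (-1) (-1)).flatMap g
      = (((List.range (m + 1)).map (fun i : Nat => g (i : Int))).reverse).flatten := by
  induction m with
  | zero =>
      rw [PySem.List.pyRange_neg_one_cons (by norm_num),
          PySem.List.pyRange_neg_one_eq_nil (by norm_num)]
      simp
  | succ m ih =>
      have hc : ((m + 1 : Nat) : Int) = (m : Int) + 1 := by push_cast; ring
      rw [hc, PySem.List.pyRange_neg_one_cons (by omega), List.flatMap_cons]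
      have hc2 : (m : Int) + 1 - 1 = (m : Int) := by ring
      rw [hc2, ih, List.range_succ (n := m + 1)]
      simp [hc]

-- ===== VERDICT (by name: the statement is the Claim_ definition above) =====
set_option maxHeartbeats 1000000 in
theorem simple_retrieve_spec : Claim_equal_simple_retrieve := by
  intro q docs k _
  unfold Spec_simple_retrieve simple_retrieve simple_retrieve_alt
  set qw : PySem.Set String := PySem.Set.ofList (PySem.Str.split₀ (PySem.Str.lower q)) with hqw
  simp only [PySem.List.foldl_append_singleton_eq_map, List.nil_append]
  rw [pv_sorted_rev_eq_buckets _ ((qw.length : Nat) : Int)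
        (by intro p hp; obtain ⟨doc, _, rfl⟩ := List.mem_map.mp hp; exact pv_score_bounds _ doc)]
  rw [← pv_slice_map, List.map_flatMap]
  -- each A-bucket of scored pairs projects to a bucket of docs
  have hA : ∀ s : Int,
      ((List.filter (fun p => p.1 == s) (docs.map (fun d => (pvScore qw d, d)))).map (fun p => p.2))
        = docs.filter (fun d => pvScore qw d == s) := by
    intro s
    simp [List.filter_map, Function.comp_def]
  simp only [hA]
  -- B side: fold into buckets, then flatten the reversed buckets
  rw [pv_foldl_append_eq_flatten, List.nil_append]
  have hB0 : (PySem.List.pyRange 0 ((qw.length : Int) + 1) 1).map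
        (fun _ => ([] : List (List (String × String))))
      = (List.range (qw.length + 1)).map (fun _ => []) := by
    rw [PySem.List.pyRange_one, List.map_map]
    congr 1
  rw [hB0, pv_buckets_eq]
  rw [pv_countdown_flatMap (fun s => docs.filter (fun d => pvScore qw d == s)) qw.length]
  -- the Int-keyed buckets are the Nat-keyed buckets
  have hfi : ∀ i : Nat,
      docs.filter (fun d => pvScore qw d == (i : Int))
        = docs.filter (fun d => pvHits qw d == i) := by
    intro i
    apply List.filter_congr
    intro d _
    rw [pv_score_eq_hits]
    simp
  simp only [hfi]
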